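-- pv_equiv track=rewrite | github.com/peter-k-1972/linux-desktop-ai-chat | scripts/qa/incidents/build_registry.py | _build_clusters
-- ===== SOURCE A (Python) =====
-- def _build_clusters(incidents: list[dict]) -> dict[str, dict[str, int]]:
--     """Baut Cluster-Mappings für failure_class, subsystem, runtime_layer."""
--     clusters: dict[str, dict[str, int]] = {
--         "failure_class": {},
--         "subsystem": {},
--         "runtime_layer": {},
--     }
--     for inc in incidents:
--         fc = inc.get("failure_class") or ""
--         if fc:
--             clusters["failure_class"][fc] = clusters["failure_class"].get(fc, 0) + 1
--         ss = inc.get("subsystem") or ""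
--         if ss:
--             clusters["subsystem"][ss] = clusters["subsystem"].get(ss, 0) + 1
--         rl = inc.get("runtime_layer") or ""
--         if rl:
--             clusters["runtime_layer"][rl] = clusters["runtime_layer"].get(rl, 0) + 1
--     return clusters
-- ===== SOURCE B (Python) =====
-- def _count(values):
--     counts = {}
--     for v in values:
--         counts[v] = counts.get(v, 0) + 1
--     return counts
--
--
-- def _build_clusters(incidents: list[dict]) -> dict[str, dict[str, int]]:
--     """Baut Cluster-Mappings fuer failure_class, subsystem, runtime_layer."""
--     fields = ("failure_class", "subsystem", "runtime_layer")
--     return {f: _count(v for inc in incidents if (v := inc.get(f) or "")) for f in fields}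
-- ===== Notes on version B (the rewrite author's own statement) =====
-- stated objective: simpler
-- what changed: Replaces the single interleaved loop that mutates three count dicts in lock-step by a dict comprehension over the three field names, each field counted by one shared _count helper over a filtered generator of that field's values, removing the three-way code duplication.
import Mathlib
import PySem

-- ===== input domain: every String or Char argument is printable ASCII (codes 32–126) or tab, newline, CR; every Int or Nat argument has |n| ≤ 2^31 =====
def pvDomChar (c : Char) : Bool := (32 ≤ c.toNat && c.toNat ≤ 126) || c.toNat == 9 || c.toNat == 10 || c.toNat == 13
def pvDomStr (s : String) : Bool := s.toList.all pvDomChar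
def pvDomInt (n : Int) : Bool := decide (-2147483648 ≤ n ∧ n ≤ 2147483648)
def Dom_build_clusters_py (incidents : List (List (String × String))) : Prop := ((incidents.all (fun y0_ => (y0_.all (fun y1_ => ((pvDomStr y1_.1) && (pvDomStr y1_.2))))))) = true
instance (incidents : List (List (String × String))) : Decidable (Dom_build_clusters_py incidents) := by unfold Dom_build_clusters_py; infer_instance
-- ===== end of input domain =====

-- B replaces A's single interleaved loop over three count dicts by one counting pass per
-- field name, factored through a shared _count helper (simpler decomposition, same cost).

-- ===== PORT A =====
-- A's dict-of-dicts 'clusters' has the three fixed keys throughout; its state is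
-- represented as the triple of the three inner dicts (mutated in place in Python),
-- assembled into the fixed-key outer association list at the end.
def build_clusters_py (incidents : List (List (String × String))) : List (String × List (String × Int)) :=
  let st := incidents.foldl (fun st inc =>
    let d : PySem.Dict String String := ⟨inc⟩
    let fcD := st.1
    let ssD := st.2.1
    let rlD := st.2.2
    let fc := d.getD "failure_class" ""    -- inc.get("failure_class") or ""
    let fcD := if fc ≠ "" then fcD.insert fc (fcD.getD fc 0 + 1) else fcD
    let ss := d.getD "subsystem" ""
    let ssD := if ss ≠ "" then ssD.insert ss (ssD.getD ss 0 + 1) else ssD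
    let rl := d.getD "runtime_layer" ""
    let rlD := if rl ≠ "" then rlD.insert rl (rlD.getD rl 0 + 1) else rlD
    (fcD, ssD, rlD))
    ((PySem.Dict.empty : PySem.Dict String Int), (PySem.Dict.empty : PySem.Dict String Int), (PySem.Dict.empty : PySem.Dict String Int))
  [("failure_class", st.1.items), ("subsystem", st.2.1.items), ("runtime_layer", st.2.2.items)]

-- ===== PORT B =====
-- port of Source B's _count: counts[v] = counts.get(v, 0) + 1 over the values
def pvCountB (values : List String) : PySem.Dict String Int :=
  values.foldl (fun counts v => counts.insert v (counts.getD v 0 + 1)) PySem.Dict.empty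

def build_clusters_py_alt (incidents : List (List (String × String))) : List (String × List (String × Int)) :=
  ["failure_class", "subsystem", "runtime_layer"].map (fun f =>
    (f, (pvCountB (((incidents.map (fun inc => (⟨inc⟩ : PySem.Dict String String).getD f "")).filter (fun v => v ≠ "")))).items))

-- ===== PRECONDITION & SPEC =====
def Spec_build_clusters_py (incidents : List (List (String × String))) (out : List (String × List (String × Int))) : Prop := out = build_clusters_py_alt incidents
instance (incidents : List (List (String × String))) (out : List (String × List (String × Int))) : Decidable (Spec_build_clusters_py incidents out) := by unfold Spec_build_clusters_py; infer_instance

-- ===== CLAIM (what is proved, stated in full; the proofs are below) =====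
def Claim_equal_build_clusters_py : Prop := ∀ (incidents : List (List (String × String))), Dom_build_clusters_py incidents → Spec_build_clusters_py incidents (build_clusters_py incidents)

-- ===== LEMMAS AND PROOFS =====

-- one field's contribution of A's loop, as a function of that field's dict alone
def pvStep (f : String) (d : PySem.Dict String Int) (inc : List (String × String)) : PySem.Dict String Int :=
  let v := (⟨inc⟩ : PySem.Dict String String).getD f ""
  if v ≠ "" then d.insert v (d.getD v 0 + 1) else d

theorem pv_triple_fold (incidents : List (List (String × String)))
    (a b c : PySem.Dict String Int) :
    incidents.foldl (fun st inc => (pvStep "failure_class" st.1 inc, pvStep "subsystem" st.2.1 inc, pvStep "runtime_layer" st.2.2 inc)) (a, b, c)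
    = (incidents.foldl (pvStep "failure_class") a,
       incidents.foldl (pvStep "subsystem") b,
       incidents.foldl (pvStep "runtime_layer") c) := by
  induction incidents generalizing a b c with
  | nil => rfl
  | cons x xs ih => simpa using ih _ _ _

theorem pv_fold_filter (f : String) (incidents : List (List (String × String)))
    (d : PySem.Dict String Int) :
    incidents.foldl (pvStep f) d
    = ((incidents.map (fun inc => (⟨inc⟩ : PySem.Dict String String).getD f "")).filter (fun v => v ≠ "")).foldl
        (fun counts v => counts.insert v (counts.getD v 0 + 1)) d := by
  induction incidents generalizing d with
  | nil => rfl
  | cons x xs ih =>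
    simp only [List.map_cons, List.filter_cons, List.foldl_cons]
    by_cases h : (⟨x⟩ : PySem.Dict String String).getD f "" = ""
    · simp [pvStep, h, ih]
    · simp [pvStep, h, ih]

-- ===== VERDICT (by name: the statement is the Claim_ definition above) =====
theorem build_clusters_py_spec : Claim_equal_build_clusters_py := by
  intro incidents _
  unfold Spec_build_clusters_py build_clusters_py build_clusters_py_alt pvCountB
  have : (fun (st : PySem.Dict String Int × PySem.Dict String Int × PySem.Dict String Int) (inc : List (String × String)) =>
      (pvStep "failure_class" st.1 inc, pvStep "subsystem" st.2.1 inc, pvStep "runtime_layer" st.2.2 inc))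
      = (fun st inc =>
    let d : PySem.Dict String String := ⟨inc⟩
    let fcD := st.1
    let ssD := st.2.1
    let rlD := st.2.2
    let fc := d.getD "failure_class" ""
    let fcD := if fc ≠ "" then fcD.insert fc (fcD.getD fc 0 + 1) else fcD
    let ss := d.getD "subsystem" ""
    let ssD := if ss ≠ "" then ssD.insert ss (ssD.getD ss 0 + 1) else ssD
    let rl := d.getD "runtime_layer" ""
    let rlD := if rl ≠ "" then rlD.insert rl (rlD.getD rl 0 + 1) else rlD
    (fcD, ssD, rlD)) := rfl
  rw [← this, pv_triple_fold, pv_fold_filter "failure_class", pv_fold_filter "subsystem", pv_fold_filter "runtime_layer"]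
  rfl
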